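-- pv_equiv track=rewrite | github.com/tartopum/MPF | mpf/analysis/production/linear_regression.py | format_A
-- ===== SOURCE A (Python) =====
-- def format_A(data):
--     """
--     data = [
--         [day1, day2, day3],
--         [cons1, cons2, cons3]
--     ]
--
--     A = [
--         [1, day1, day1**2, cons1, cons1**2],
--         [1, day2, day2**2, cons2, cons2**2],
--         [1, day3, day3**2, cons3, cons3**2]
--     ]
--     """
--
--     A = []
--
--     for i in range(len(data[0])):
--         line = [1] # Offset
--
--         for series in data:
--             line.append(series[i])
--             line.append(series[i]**2)
--
--         A.append(line)
--
--     return A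
-- ===== SOURCE B (Python) =====
-- def format_A(data):
--     n = len(data[0])
--     cols = [[1] * n]
--     for series in data:
--         vals = [series[i] for i in range(n)]
--         cols.append(vals)
--         cols.append([v * v for v in vals])
--     return [[col[i] for col in cols] for i in range(n)]
-- ===== Notes on version B (the rewrite author's own statement) =====
-- stated objective: alternative
-- what changed: B builds the matrix column-major (ones column, then a value column and a square column per series) and transposes at the end, instead of A's point-outer row-by-row construction.
import Mathlib
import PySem

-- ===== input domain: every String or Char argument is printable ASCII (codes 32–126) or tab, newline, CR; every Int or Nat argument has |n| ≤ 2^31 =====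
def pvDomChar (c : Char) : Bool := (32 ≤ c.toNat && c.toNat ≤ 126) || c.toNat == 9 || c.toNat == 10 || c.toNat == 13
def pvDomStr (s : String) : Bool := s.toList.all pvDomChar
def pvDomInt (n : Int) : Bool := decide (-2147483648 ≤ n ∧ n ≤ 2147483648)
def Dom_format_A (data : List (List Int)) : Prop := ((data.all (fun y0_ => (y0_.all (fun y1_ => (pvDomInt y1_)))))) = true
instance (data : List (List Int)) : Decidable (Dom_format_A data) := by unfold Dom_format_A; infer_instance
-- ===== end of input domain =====

-- B builds the matrix column-major and transposes at the end; A builds it row by row (objective: alternative decomposition).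

-- ===== PORT A =====
-- for i in range(len(data[0])): line = [1]; for series in data: line += [series[i], series[i]**2]; A.append(line)
def format_A (data : List (List Int)) : List (List Int) :=
  (PySem.List.pyRange 0 ((PySem.List.pyGetD data 0 []).length : Int) 1).map (fun i =>
    data.foldl (fun line series =>
      line ++ [PySem.List.pyGetD series i 0, (PySem.List.pyGetD series i 0) ^ 2]) [1])

-- ===== PORT B =====
-- vals = [series[i] for i in range(n)]
def pvValsCol (series : List Int) (n : Nat) : List Int :=
  (PySem.List.pyRange 0 (n : Int) 1).map (fun i => PySem.List.pyGetD series i 0)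

def format_A_alt (data : List (List Int)) : List (List Int) :=
  let n := (PySem.List.pyGetD data 0 []).length
  let cols := data.foldl (fun acc series =>
      acc ++ [pvValsCol series n, (pvValsCol series n).map (fun v => v * v)])
    [List.replicate n 1]
  (PySem.List.pyRange 0 (n : Int) 1).map (fun i =>
    cols.map (fun col => PySem.List.pyGetD col i 0))

-- ===== PRECONDITION & SPEC =====
-- Pre_: exactly where Python A returns: data nonempty and every series at least as long as data[0].
def Pre_format_A (data : List (List Int)) : Prop :=
  data ≠ [] ∧ ∀ s ∈ data, (data.headD []).length ≤ s.length
instance (data : List (List Int)) : Decidable (Pre_format_A data) := by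
  unfold Pre_format_A; infer_instance
def pvWitness_format_A : List (List Int) := [[1, 2, 3], [4, 5, 6]]

def Spec_format_A (data : List (List Int)) (out : List (List Int)) : Prop := out = format_A_alt data
instance (data : List (List Int)) (out : List (List Int)) : Decidable (Spec_format_A data out) := by unfold Spec_format_A; infer_instance

-- ===== CLAIM (what is proved, stated in full; the proofs are below) =====
def Claim_equal_format_A : Prop := ∀ (data : List (List Int)), Dom_format_A data → Pre_format_A data → Spec_format_A data (format_A data)

-- ===== LEMMAS AND PROOFS =====

-- picking row i of B's column list equals A's inner fold over the series
theorem pv_pick_fold (n : Nat) (i : Int) (h0 : 0 ≤ i) (hn : i < (n : Int)) :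
    ∀ (data acc : List (List Int)),
      ((data.foldl (fun acc series =>
          acc ++ [pvValsCol series n, (pvValsCol series n).map (fun v => v * v)]) acc).map
        (fun col => PySem.List.pyGetD col i 0))
      = data.foldl (fun line series =>
          line ++ [PySem.List.pyGetD series i 0, (PySem.List.pyGetD series i 0) ^ 2])
          (acc.map (fun col => PySem.List.pyGetD col i 0)) := by
  intro data
  induction data with
  | nil => intro acc; simp
  | cons s rest ih =>
    intro acc
    simp only [List.foldl_cons]
    rw [ih]
    congr 1
    rw [List.map_append]
    simp only [List.map_cons, List.map_nil]
    unfold pvValsCol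
    rw [List.map_map]
    rw [PySem.List.pyGetD_map_pyRange_of_nonneg _ _ _ _ h0 hn,
        PySem.List.pyGetD_map_pyRange_of_nonneg _ _ _ _ h0 hn]
    simp [pow_two]

theorem format_A_eq_alt (data : List (List Int)) : format_A data = format_A_alt data := by
  unfold format_A format_A_alt
  apply List.map_congr_left
  intro i hi
  rw [PySem.List.mem_pyRange_one] at hi
  rw [pv_pick_fold _ i hi.1 hi.2]
  congr 1
  simp only [List.map_cons, List.map_nil]
  congr 1
  rw [PySem.List.pyGetD_eq_getElem _ 0 hi.1 (by simpa using hi.2)]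
  simp

-- ===== VERDICT (by name: the statement is the Claim_ definition above) =====
theorem format_A_spec : Claim_equal_format_A := by
  intro data _ _
  unfold Spec_format_A
  exact format_A_eq_alt data
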